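-- pv_equiv track=rewrite | github.com/sancarder/adventofcode-2019 | 4/4b.py | check_double_digits
-- ===== SOURCE A (Python) =====
-- def check_double_digits(password):
--     numbers = list(password)
--     status = False
--     #lastGroupPos = 0
--     #Treat first character as special case
--     if numbers[0]==numbers[1]:
--         status = True
--
--     for n in range(1,len(numbers)-1):
--         if (numbers[n] == numbers[n+1]):
--             if numbers[n-1] != numbers[n]:
--                 status = True
--             else:
--                 status = False
--
--     return status
-- ===== SOURCE B (Python) =====
-- def check_double_digits(password):
--     numbers = list(password)
--     # Reverse early-exit scan: the last qualifying pair decides the result.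
--     for n in range(len(numbers) - 2, 0, -1):
--         if numbers[n] == numbers[n + 1]:
--             return numbers[n - 1] != numbers[n]
--     return numbers[0] == numbers[1]
-- ===== Notes on version B (the rewrite author's own statement) =====
-- stated objective: faster
-- what changed: Replaces A's full forward scan that repeatedly overwrites a status flag with a reverse scan that returns immediately at the first (i.e. last in forward order) adjacent-equal pair, falling back to comparing the first two characters; the early exit avoids traversing the rest of the string.
import Mathlib
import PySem

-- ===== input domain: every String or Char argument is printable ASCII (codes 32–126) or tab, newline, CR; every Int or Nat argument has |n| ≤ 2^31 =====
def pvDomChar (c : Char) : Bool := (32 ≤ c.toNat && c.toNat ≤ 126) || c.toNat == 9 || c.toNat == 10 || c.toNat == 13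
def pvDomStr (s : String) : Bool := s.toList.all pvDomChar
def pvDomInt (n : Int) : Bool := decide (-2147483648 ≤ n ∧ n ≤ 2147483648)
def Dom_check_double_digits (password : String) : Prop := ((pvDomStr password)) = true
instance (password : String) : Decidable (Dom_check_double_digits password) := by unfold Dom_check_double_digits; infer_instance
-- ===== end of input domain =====

-- B replaces A's forward overwrite scan by a reverse early-exit scan (alternative decomposition);
-- return values are proved equal on all strings of length ≥ 2 (A raises IndexError on shorter input).

-- ===== PORT A =====
-- forward scan: status overwritten at every adjacent-equal pair
def check_double_digits (password : String) : Bool :=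
  let numbers := password.toList
  let status : Bool :=
    PySem.List.pyGet? numbers 0 == PySem.List.pyGet? numbers 1
  (PySem.List.pyRange 1 ((numbers.length : Int) - 1) 1).foldl
    (fun status n =>
      if PySem.List.pyGet? numbers n == PySem.List.pyGet? numbers (n + 1) then
        (if PySem.List.pyGet? numbers (n - 1) != PySem.List.pyGet? numbers n then true else false)
      else status)
    status

-- ===== PORT B =====
-- reverse scan with early return (structural recursion on the countdown index list)
def check_double_digits_altLoop (numbers : List Char) : List Int → Bool
  | [] => PySem.List.pyGet? numbers 0 == PySem.List.pyGet? numbers 1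
  | n :: rest =>
    if PySem.List.pyGet? numbers n == PySem.List.pyGet? numbers (n + 1) then
      PySem.List.pyGet? numbers (n - 1) != PySem.List.pyGet? numbers n
    else check_double_digits_altLoop numbers rest

def check_double_digits_alt (password : String) : Bool :=
  let numbers := password.toList
  check_double_digits_altLoop numbers
    (PySem.List.pyRange ((numbers.length : Int) - 2) 0 (-1))

-- ===== PRECONDITION & SPEC =====
-- Pre_ excludes strings of length < 2, on which the Python A raises IndexError (numbers[0]/numbers[1]).
def Pre_check_double_digits (password : String) : Prop := 2 ≤ password.toList.length
instance (password : String) : Decidable (Pre_check_double_digits password) := by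
  unfold Pre_check_double_digits; infer_instance
def pvWitness_check_double_digits : String := "112345"

def Spec_check_double_digits (password : String) (out : Bool) : Prop := out = check_double_digits_alt password
instance (password : String) (out : Bool) : Decidable (Spec_check_double_digits password out) := by unfold Spec_check_double_digits; infer_instance

-- ===== CLAIM (what is proved, stated in full; the proofs are below) =====
def Claim_equal_check_double_digits : Prop := ∀ (password : String), Dom_check_double_digits password → Pre_check_double_digits password → Spec_check_double_digits password (check_double_digits password)

-- ===== LEMMAS AND PROOFS =====

-- reverse early-exit scan with an EXPLICIT fallback (generalizes B's loop for the induction)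
def pvLoopGen (numbers : List Char) : List Int → Bool → Bool
  | [], s => s
  | n :: rest, s =>
    if PySem.List.pyGet? numbers n == PySem.List.pyGet? numbers (n + 1) then
      PySem.List.pyGet? numbers (n - 1) != PySem.List.pyGet? numbers n
    else pvLoopGen numbers rest s

-- A's one loop step
def pvStep (numbers : List Char) (s : Bool) (n : Int) : Bool :=
  if PySem.List.pyGet? numbers n == PySem.List.pyGet? numbers (n + 1) then
    (if PySem.List.pyGet? numbers (n - 1) != PySem.List.pyGet? numbers n then true else false)
  else s

theorem pvLoopGen_snoc (numbers : List Char) (l : List Int) (n : Int) (s : Bool) :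
    pvLoopGen numbers (l ++ [n]) s = pvLoopGen numbers l (pvStep numbers s n) := by
  induction l with
  | nil => simp only [List.nil_append, pvLoopGen, pvStep]; split_ifs <;> simp_all [bne]
  | cons m l ih => simp [pvLoopGen, ih]

theorem foldl_step_eq_loopGen (numbers : List Char) (ns : List Int) (s : Bool) :
    ns.foldl (pvStep numbers) s = pvLoopGen numbers ns.reverse s := by
  induction ns generalizing s with
  | nil => simp [pvLoopGen]
  | cons n rest ih => simp only [List.foldl_cons, List.reverse_cons, ih, pvLoopGen_snoc]

theorem altLoop_eq_loopGen (numbers : List Char) (ns : List Int) :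
    check_double_digits_altLoop numbers ns
      = pvLoopGen numbers ns (PySem.List.pyGet? numbers 0 == PySem.List.pyGet? numbers 1) := by
  induction ns with
  | nil => simp [check_double_digits_altLoop, pvLoopGen]
  | cons n rest ih => simp [check_double_digits_altLoop, pvLoopGen, ih]

-- ===== VERDICT (by name: the statement is the Claim_ definition above) =====
theorem check_double_digits_spec : Claim_equal_check_double_digits := by
  intro password _ _
  unfold Spec_check_double_digits check_double_digits check_double_digits_alt
  have hrev : PySem.List.pyRange ((password.toList.length : Int) - 2) 0 (-1)
      = (PySem.List.pyRange 1 ((password.toList.length : Int) - 1) 1).reverse := by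
    rw [PySem.List.pyRange_neg_one_eq_reverse,
      show ((password.toList.length : Int) - 2 + 1) = (password.toList.length : Int) - 1 from by ring,
      show ((0 : Int) + 1) = 1 from by ring]
  dsimp only
  rw [hrev, altLoop_eq_loopGen]
  exact foldl_step_eq_loopGen _ _ _
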